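-- pv_equiv track=rewrite | github.com/naemhui/SSAFY_ALgorithm | [0816-18] IM대비/14413_grid.py | check
-- ===== SOURCE A (Python) =====
-- di = [-1, 1, 0, 0]
--
-- dj = [0, 0, -1, 1]
--
-- def is_valid(i, j, N, M):
--     return 0 <= i < N and 0 <= j < M
--
-- def check(arr, N, M):
--     for i in range(N):
--         for j in range(M):
--             # 1. color 배열에 0이 있다면 impossible
--             if arr[i][j] == 0:
--                 return 'impossible'
--             # 2. 인접한 두 컬러가 같으면 impossible
--             for d in range(4):
--                 ni = i + di[d]
--                 nj = j + dj[d]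
--                 if is_valid(ni, nj, N, M) and arr[i][j] == arr[ni][nj]:
--                     return 'impossible'
--     return 'possible'
-- ===== SOURCE B (Python) =====
-- def check(arr, N, M):
--     # materialize the N x M subgrid once, then do index-free checks on it
--     g = [[arr[i][j] for j in range(M)] for i in range(N)]
--
--     def rows_ok(rows):
--         # a block of rows is ok iff it contains no zero and no equal horizontally-adjacent pair
--         if any(0 in row for row in rows):
--             return False
--         return all(a != b for row in rows for a, b in zip(row, row[1:]))
--
--     # vertical adjacency in g is horizontal adjacency in the transpose
--     return 'possible' if rows_ok(g) and rows_ok(list(map(list, zip(*g)))) else 'impossible'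
-- ===== Notes on version B (the rewrite author's own statement) =====
-- stated objective: alternative
-- what changed: B first materializes the N x M subgrid, then runs one index-free row validator (no zero, no equal adjacent pair via zip) on the grid and again on its transpose (zip(*g)), so the vertical check is reduced to the horizontal one by transposition and A's di/dj offset tables and is_valid bounds test disappear.
-- outside the precondition, e.g. on check([[0]], 1, 2): A returns 'impossible', B raises IndexError; on check([[1, 2], [1]], 2, 2): A returns 'impossible', B raises IndexError
import Mathlib
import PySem

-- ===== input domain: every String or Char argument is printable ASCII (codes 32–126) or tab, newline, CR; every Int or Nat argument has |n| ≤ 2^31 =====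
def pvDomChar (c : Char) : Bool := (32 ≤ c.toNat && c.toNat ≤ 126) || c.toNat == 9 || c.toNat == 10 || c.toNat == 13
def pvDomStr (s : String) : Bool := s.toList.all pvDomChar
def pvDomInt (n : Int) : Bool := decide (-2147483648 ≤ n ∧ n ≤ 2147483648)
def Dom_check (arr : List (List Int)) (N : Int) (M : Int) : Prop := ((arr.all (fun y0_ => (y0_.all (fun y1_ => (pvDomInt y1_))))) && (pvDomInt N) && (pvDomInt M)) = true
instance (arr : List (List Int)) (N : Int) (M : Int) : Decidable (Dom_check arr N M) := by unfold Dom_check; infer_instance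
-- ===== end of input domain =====

-- B materializes the N×M subgrid once, then applies one index-free row validator (no zero,
-- no equal horizontally-adjacent pair, via zip) to the grid and to its transpose (zip(*g)),
-- replacing A's fused per-cell 4-direction loop with di/dj tables; objective: alternative.

-- ===== PORT A =====
-- arr[i][j]; default values are never reached under Pre_check (indices are in range there)
def pvGet (arr : List (List Int)) (i j : Int) : Int :=
  PySem.List.pyGetD (PySem.List.pyGetD arr i ([] : List Int)) j 0

def diA : List Int := [-1, 1, 0, 0]
def djA : List Int := [0, 0, -1, 1]

def is_valid (i : Int) (j : Int) (N : Int) (M : Int) : Bool :=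
  decide (0 ≤ i ∧ i < N) && decide (0 ≤ j ∧ j < M)

def check (arr : List (List Int)) (N : Int) (M : Int) : String :=
  if (PySem.List.pyRange 0 N 1).any (fun i =>
       (PySem.List.pyRange 0 M 1).any (fun j =>
         (pvGet arr i j == 0) ||
         (PySem.List.pyRange 0 4 1).any (fun d =>
            let ni := i + PySem.List.pyGetD diA d 0
            let nj := j + PySem.List.pyGetD djA d 0
            is_valid ni nj N M && (pvGet arr i j == pvGet arr ni nj))))
  then "impossible" else "possible"

-- ===== PORT B =====
-- rows_ok(rows): no zero anywhere and no equal horizontally-adjacent pair (zip(row, row[1:]))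
def rows_ok (rows : List (List Int)) : Bool :=
  if rows.any (fun row => decide ((0 : Int) ∈ row)) then false
  else rows.all (fun row => (row.zip row.tail).all (fun p => !(p.1 == p.2)))

-- list(map(list, zip(*g))): the truncating transpose, stops at the shortest row (zip semantics)
def pyZipStar (g : List (List Int)) : List (List Int) :=
  if g.isEmpty || g.any (fun r => r.isEmpty) then []
  else (g.map (fun r => r.headD 0)) :: pyZipStar (g.map (fun r => r.tail))
termination_by (g.headD []).length
decreasing_by
  rename_i h
  cases g with
  | nil => simp at h
  | cons x rest =>
    simp only [Bool.or_eq_true, not_or, List.any_eq_true, not_exists, not_and] at h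
    have hx : ¬ x.isEmpty := h.2 x (by simp)
    simp only [List.headD_cons]
    cases x with
    | nil => simp at hx
    | cons a t => simp

def check_alt (arr : List (List Int)) (N : Int) (M : Int) : String :=
  let g := (PySem.List.pyRange 0 N 1).map (fun i =>
             (PySem.List.pyRange 0 M 1).map (fun j => pvGet arr i j))
  if rows_ok g && rows_ok (pyZipStar g) then "possible" else "impossible"

-- ===== PRECONDITION & SPEC =====
-- Pre_ excludes shapes on which the Python indexing arr[i][j] can raise IndexError
-- (N exceeding the number of rows, or a scanned row shorter than M); on a few such
-- inputs A still returns 'impossible' early before reaching the bad index.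
def Pre_check (arr : List (List Int)) (N : Int) (M : Int) : Prop :=
  N ≤ (arr.length : Int) ∧ ∀ row ∈ arr.take N.toNat, M ≤ (row.length : Int)
instance (arr : List (List Int)) (N : Int) (M : Int) : Decidable (Pre_check arr N M) := by
  unfold Pre_check; infer_instance

def pvWitness_check : List (List Int) × Int × Int := ([[1, 2], [3, 4]], 2, 2)

def Spec_check (arr : List (List Int)) (N : Int) (M : Int) (out : String) : Prop := out = check_alt arr N M
instance (arr : List (List Int)) (N : Int) (M : Int) (out : String) : Decidable (Spec_check arr N M out) := by unfold Spec_check; infer_instance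

-- ===== CLAIM (what is proved, stated in full; the proofs are below) =====
def Claim_equal_check : Prop := ∀ (arr : List (List Int)) (N : Int) (M : Int), Dom_check arr N M → Pre_check arr N M → Spec_check arr N M (check arr N M)

-- ===== LEMMAS AND PROOFS =====

lemma any_pyRange_iff (n : Int) (p : Int → Bool) :
    (PySem.List.pyRange 0 n 1).any p = true ↔ ∃ i : Int, 0 ≤ i ∧ i < n ∧ p i = true := by
  simp [List.any_eq_true, PySem.List.mem_pyRange_one, and_assoc]

lemma range4 : PySem.List.pyRange 0 4 1 = [0, 1, 2, 3] := by decide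

-- A's fused condition equals the disjunction of the zero / horizontal / vertical conditions
lemma cond_eq (arr : List (List Int)) (N M : Int) :
    ((PySem.List.pyRange 0 N 1).any (fun i =>
       (PySem.List.pyRange 0 M 1).any (fun j =>
         (pvGet arr i j == 0) ||
         (PySem.List.pyRange 0 4 1).any (fun d =>
            let ni := i + PySem.List.pyGetD diA d 0
            let nj := j + PySem.List.pyGetD djA d 0
            is_valid ni nj N M && (pvGet arr i j == pvGet arr ni nj)))))
    =
    (((PySem.List.pyRange 0 N 1).any (fun i =>
       (PySem.List.pyRange 0 M 1).any (fun j => pvGet arr i j == 0))) ||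
     ((PySem.List.pyRange 0 N 1).any (fun i =>
       (PySem.List.pyRange 0 (M - 1) 1).any (fun j =>
          pvGet arr i j == pvGet arr i (j + 1)))) ||
     ((PySem.List.pyRange 0 (N - 1) 1).any (fun i =>
       (PySem.List.pyRange 0 M 1).any (fun j =>
          pvGet arr i j == pvGet arr (i + 1) j)))) := by
  rw [Bool.eq_iff_iff]
  have e0 : PySem.List.pyGetD diA (0 : Int) 0 = -1 := by decide
  have e1 : PySem.List.pyGetD diA (1 : Int) 0 = 1 := by decide
  have e2 : PySem.List.pyGetD diA (2 : Int) 0 = 0 := by decide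
  have e3 : PySem.List.pyGetD diA (3 : Int) 0 = 0 := by decide
  have f0 : PySem.List.pyGetD djA (0 : Int) 0 = 0 := by decide
  have f1 : PySem.List.pyGetD djA (1 : Int) 0 = 0 := by decide
  have f2 : PySem.List.pyGetD djA (2 : Int) 0 = -1 := by decide
  have f3 : PySem.List.pyGetD djA (3 : Int) 0 = 1 := by decide
  simp only [range4, Bool.or_eq_true, any_pyRange_iff, List.any_cons, List.any_nil,
    e0, e1, e2, e3, f0, f1, f2, f3, is_valid, Bool.and_eq_true, decide_eq_true_eq,
    beq_iff_eq, add_zero, Bool.or_false]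
  constructor
  · rintro ⟨i, hi0, hiN, j, hj0, hjM, h⟩
    rcases h with h0 | h
    · exact Or.inl (Or.inl ⟨i, hi0, hiN, j, hj0, hjM, h0⟩)
    · rcases h with ⟨⟨hv1, hv2⟩, he⟩ | ⟨⟨hv1, hv2⟩, he⟩ | ⟨⟨hv1, hv2⟩, he⟩ | ⟨⟨hv1, hv2⟩, he⟩
      · refine Or.inr ⟨i + (-1), by omega, by omega, j, hj0, hjM, ?_⟩
        have h' : i + (-1) + 1 = i := by omega
        rw [h']; exact he.symm
      · exact Or.inr ⟨i, hi0, by omega, j, hj0, hjM, he⟩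
      · refine Or.inl (Or.inr ⟨i, hi0, hiN, j + (-1), by omega, by omega, ?_⟩)
        have h' : j + (-1) + 1 = j := by omega
        rw [h']; exact he.symm
      · exact Or.inl (Or.inr ⟨i, hi0, hiN, j, hj0, by omega, he⟩)
  · rintro ((⟨i, hi0, hiN, j, hj0, hjM, h0⟩ | ⟨i, hi0, hiN, j, hj0, hjM, he⟩) | ⟨i, hi0, hiN, j, hj0, hjM, he⟩)
    · exact ⟨i, hi0, hiN, j, hj0, hjM, Or.inl h0⟩
    · exact ⟨i, hi0, hiN, j, hj0, by omega,
        Or.inr (Or.inr (Or.inr (Or.inr ⟨⟨⟨hi0, hiN⟩, by omega, by omega⟩, he⟩)))⟩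
    · exact ⟨i, hi0, by omega, j, hj0, hjM,
        Or.inr (Or.inr (Or.inl ⟨⟨⟨by omega, by omega⟩, hj0, hjM⟩, he⟩))⟩

-- the truncating transpose of a rectangular range-built grid is the transposed grid
lemma pyZipStar_grid (M' : Nat) :
    ∀ (F : Nat → Nat → Int) (N' : Nat), N' ≠ 0 →
    pyZipStar ((List.range N').map (fun a => (List.range M').map (F a)))
      = (List.range M').map (fun b => (List.range N').map (fun a => F a b)) := by
  induction M' with
  | zero =>
    intro F N' hN
    rw [pyZipStar]
    simp
  | succ m ih =>
    intro F N' hN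
    rw [pyZipStar]
    have hrange : List.range (m + 1) = 0 :: (List.range m).map Nat.succ :=
      List.range_succ_eq_map
    have hne : ((List.range N').map (fun a => (List.range (m + 1)).map (F a))).isEmpty = false := by
      simp [List.isEmpty_eq_false_iff]
      omega
    have hno : ((List.range N').map (fun a => (List.range (m + 1)).map (F a))).any
        (fun r => r.isEmpty) = false := by
      simp only [List.any_eq_false]
      intro r hr
      simp only [List.mem_map] at hr
      obtain ⟨a, _, rfl⟩ := hr
      simp [hrange]
    rw [hne, hno]
    simp only [Bool.or_self, if_false, Bool.false_eq_true]
    have hheads : ((List.range N').map (fun a => (List.range (m + 1)).map (F a))).map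
        (fun r => r.headD 0) = (List.range N').map (fun a => F a 0) := by
      rw [List.map_map]
      apply List.map_congr_left
      intro a _
      simp [hrange]
    have htails : ((List.range N').map (fun a => (List.range (m + 1)).map (F a))).map
        (fun r => r.tail) = (List.range N').map (fun a => (List.range m).map (fun b => F a (b + 1))) := by
      rw [List.map_map]
      apply List.map_congr_left
      intro a _
      simp [hrange, List.map_map]
    rw [hheads, htails, ih (fun a b => F a (b + 1)) N' hN]
    conv_rhs => rw [hrange]
    simp [List.map_map]

lemma rows_ok_iff (rows : List (List Int)) :
    rows_ok rows = true ↔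
      (∀ row ∈ rows, (0 : Int) ∉ row) ∧
      (∀ row ∈ rows, ∀ p ∈ row.zip row.tail, p.1 ≠ p.2) := by
  unfold rows_ok
  split_ifs with h
  · simp only [List.any_eq_true, decide_eq_true_eq] at h
    simp only [false_iff, not_and_or]
    exact Or.inl (by obtain ⟨r, hr, h0⟩ := h; intro hc; exact hc r hr h0)
  · simp only [List.any_eq_true, decide_eq_true_eq, not_exists, not_and] at h
    simp only [List.all_eq_true, Bool.not_eq_eq_eq_not, Bool.not_true, beq_eq_false_iff_ne,
      ne_eq]
    exact ⟨fun hall => ⟨h, hall⟩, fun ⟨_, h2⟩ => h2⟩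

-- zip(l, l[1:]) for a map over List.range, as a map over List.range (n-1)
lemma zip_tail_map_range (n : Nat) (f : Nat → Int) :
    ((List.range n).map f).zip (((List.range n).map f).tail)
      = (List.range (n - 1)).map (fun k => (f k, f (k + 1))) := by
  apply List.ext_getElem
  · simp only [List.length_zip, List.length_map, List.length_range, List.length_tail]
    omega
  · intro k h1 h2
    have hk : k < n - 1 := by simpa using h2
    simp [List.getElem_zip, List.getElem_tail]

-- the grid of B, re-expressed over List.range
lemma grid_eq (arr : List (List Int)) (N M : Int) :
    (PySem.List.pyRange 0 N 1).map (fun i =>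
      (PySem.List.pyRange 0 M 1).map (fun j => pvGet arr i j))
    = (List.range N.toNat).map (fun a : Nat =>
        (List.range M.toNat).map (fun b : Nat => pvGet arr (a : Int) (b : Int))) := by
  rw [PySem.List.pyRange_one, PySem.List.pyRange_one]
  simp only [sub_zero, zero_add, List.map_map, Function.comp_def]

-- B's acceptance condition is the negation of A's rejection condition
lemma key_bool (arr : List (List Int)) (N M : Int) :
    (rows_ok ((List.range N.toNat).map (fun a : Nat =>
        (List.range M.toNat).map (fun b : Nat => pvGet arr (a : Int) (b : Int))))
     && rows_ok (pyZipStar ((List.range N.toNat).map (fun a : Nat =>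
        (List.range M.toNat).map (fun b : Nat => pvGet arr (a : Int) (b : Int))))))
    =
    !(((PySem.List.pyRange 0 N 1).any (fun i =>
       (PySem.List.pyRange 0 M 1).any (fun j => pvGet arr i j == 0))) ||
     ((PySem.List.pyRange 0 N 1).any (fun i =>
       (PySem.List.pyRange 0 (M - 1) 1).any (fun j =>
          pvGet arr i j == pvGet arr i (j + 1)))) ||
     ((PySem.List.pyRange 0 (N - 1) 1).any (fun i =>
       (PySem.List.pyRange 0 M 1).any (fun j =>
          pvGet arr i j == pvGet arr (i + 1) j)))) := by
  by_cases hN0 : N.toNat = 0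
  · have hz : PySem.List.pyRange 0 N 1 = [] := PySem.List.pyRange_one_eq_nil (by omega)
    have hv : PySem.List.pyRange 0 (N - 1) 1 = [] := PySem.List.pyRange_one_eq_nil (by omega)
    rw [hz, hv, hN0]
    rw [pyZipStar]
    simp [rows_ok]
  · rw [pyZipStar_grid M.toNat (fun a b => pvGet arr (a : Int) (b : Int)) N.toNat hN0]
    rw [Bool.eq_iff_iff]
    simp only [Bool.and_eq_true, rows_ok_iff, List.mem_range, List.mem_map,
      zip_tail_map_range, Bool.not_eq_eq_eq_not, Bool.not_true, ← Bool.not_eq_true,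
      Bool.or_eq_true, any_pyRange_iff, beq_iff_eq, not_or, not_exists, not_and, ne_eq,
      Prod.forall, Prod.mk.injEq, forall_exists_index, and_imp, forall_apply_eq_imp_iff₂]
    constructor
    · rintro ⟨⟨hz, hh⟩, _, hv⟩
      refine ⟨⟨?_, ?_⟩, ?_⟩
      · intro i h0i hiN j h0j hjM
        have := hz i.toNat (by omega) j.toNat (by omega)
        rwa [Int.toNat_of_nonneg h0i, Int.toNat_of_nonneg h0j] at this
      · intro i h0i hiN j h0j hjM heq
        refine hh i.toNat (by omega) (pvGet arr i j) (pvGet arr i (j + 1)) j.toNat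
          (by omega) ?_ ?_ heq
        · rw [Int.toNat_of_nonneg h0i, Int.toNat_of_nonneg h0j]
        · rw [Int.toNat_of_nonneg h0i]
          congr 1
          omega
      · intro i h0i hiN j h0j hjM heq
        refine hv j.toNat (by omega) (pvGet arr i j) (pvGet arr (i + 1) j) i.toNat
          (by omega) ?_ ?_ heq
        · rw [Int.toNat_of_nonneg h0i, Int.toNat_of_nonneg h0j]
        · rw [Int.toNat_of_nonneg h0j]
          congr 1
          omega
    · rintro ⟨⟨hz, hh⟩, hv⟩
      refine ⟨⟨?_, ?_⟩, ?_, ?_⟩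
      · intro a ha b hb
        exact hz (↑a) (by omega) (by omega) (↑b) (by omega) (by omega)
      · intro a ha a2 b x hx h1 h2 heq
        refine hh (↑a) (by omega) (by omega) (↑x) (by omega) (by omega) ?_
        rw [h1, heq, ← h2]
        congr 1
      · intro b hb a ha
        exact hz (↑a) (by omega) (by omega) (↑b) (by omega) (by omega)
      · intro b hb a2 b2 x hx h1 h2 heq
        refine hv (↑x) (by omega) (by omega) (↑b) (by omega) (by omega) ?_
        rw [h1, heq, ← h2]
        congr 1

lemma if_swap_bool (x : Bool) :
    (if x then "impossible" else "possible") = (if !x then "possible" else "impossible") := by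
  cases x <;> rfl

-- ===== VERDICT (by name: the statement is the Claim_ definition above) =====
theorem check_spec : Claim_equal_check := by
  intro arr N M _hDom _hPre
  unfold Spec_check check check_alt
  rw [cond_eq arr N M]
  simp only [grid_eq arr N M]
  rw [key_bool arr N M]
  exact if_swap_bool _
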